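-- pv_equiv track=rewrite | github.com/taka9999/Research_RAG | rag/expand_curate.py | uniq_extend
-- ===== SOURCE A (Python) =====
-- from typing import Any, Dict, List, Tuple
--
-- def uniq_extend(existing: List[str], add: List[str]) -> List[str]:
--     seen = {x.lower(): x for x in existing}
--     for w in add:
--         wl = w.lower()
--         if wl not in seen:
--             existing.append(w)
--             seen[wl] = w
--     return existing
-- ===== SOURCE B (Python) =====
-- def uniq_extend(existing, add):
--     # staged: lowered-existing set; first-occurrence picker; ordered dedup of lowered add; one extend
--     lows = {e.lower() for e in existing}
--     first = {w.lower(): w for w in reversed(add)}  # first occurrence's casing wins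
--     existing.extend(first[k] for k in dict.fromkeys(w.lower() for w in add) if k not in lows)
--     return existing
-- ===== Notes on version B (the rewrite author's own statement) =====
-- stated objective: alternative
-- what changed: replaces A's single interleaved loop with a growing seen dict by a staged loop-free pipeline: a set of lowered existing, a reversed-comprehension dict picking each first occurrence, dict.fromkeys for ordered case-insensitive dedup of add, and one extend
import Mathlib
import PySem

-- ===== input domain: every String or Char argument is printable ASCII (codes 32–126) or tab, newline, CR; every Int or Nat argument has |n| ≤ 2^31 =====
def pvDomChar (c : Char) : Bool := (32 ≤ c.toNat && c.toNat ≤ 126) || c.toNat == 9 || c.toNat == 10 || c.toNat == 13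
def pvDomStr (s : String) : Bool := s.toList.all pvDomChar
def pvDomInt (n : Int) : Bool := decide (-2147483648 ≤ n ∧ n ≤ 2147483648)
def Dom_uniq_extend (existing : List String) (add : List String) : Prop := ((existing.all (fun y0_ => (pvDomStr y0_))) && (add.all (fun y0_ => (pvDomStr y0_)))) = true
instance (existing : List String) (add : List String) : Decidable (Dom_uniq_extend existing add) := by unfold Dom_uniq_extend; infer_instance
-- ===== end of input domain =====

-- B replaces A's interleaved append-as-you-scan loop by a staged pipeline: lowered-existing set,
-- first-occurrence dict built from reversed(add), ordered dedup of the lowered add, one extend.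
-- Both A and B mutate `existing` in place in Python (the same appends); the equivalence proved is about the return value.

-- ===== PORT A =====
def uniq_extend (existing : List String) (add : List String) : List String :=
  let seen : PySem.Dict String String :=
    existing.foldl (fun d x => d.insert (PySem.Str.lower x) x) PySem.Dict.empty
  (add.foldl (fun (st : List String × PySem.Dict String String) w =>
      let wl := PySem.Str.lower w
      if st.2.contains wl then st
      else (st.1 ++ [w], st.2.insert wl w)) (existing, seen)).1

-- ===== PORT B =====
def uniq_extend_alt (existing : List String) (add : List String) : List String :=
  let lows : PySem.Set String := PySem.Set.ofList (existing.map PySem.Str.lower)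
  let first : PySem.Dict String String :=
    add.reverse.foldl (fun d w => d.insert (PySem.Str.lower w) w) PySem.Dict.empty
  -- Python's first[k] never misses (k ranges over lowered add, the keys of first): getD "" is exact there
  existing ++
    ((PySem.List.dedup (add.map PySem.Str.lower)).filter
        (fun k => !(PySem.Set.contains lows k))).map (fun k => first.getD k "")

-- ===== PRECONDITION & SPEC =====
def Spec_uniq_extend (existing : List String) (add : List String) (out : List String) : Prop := out = uniq_extend_alt existing add
instance (existing : List String) (add : List String) (out : List String) : Decidable (Spec_uniq_extend existing add out) := by unfold Spec_uniq_extend; infer_instance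

-- ===== CLAIM (what is proved, stated in full; the proofs are below) =====
def Claim_equal_uniq_extend : Prop := ∀ (existing : List String) (add : List String), Dom_uniq_extend existing add → Spec_uniq_extend existing add (uniq_extend existing add)

-- ===== LEMMAS AND PROOFS =====

theorem pvSetFold (xs : List String) (s : PySem.Set String) :
    xs.foldl PySem.Set.add s
      = s ++ (xs.foldl PySem.Set.add []).filter (fun y => !(PySem.Set.contains s y)) := by
  induction xs generalizing s with
  | nil => simp
  | cons x xs ih =>
    have hadd : PySem.Set.add s x = if s.contains x then s else s ++ [x] := rfl
    have hnil : PySem.Set.add ([] : PySem.Set String) x = [x] := rfl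
    simp only [List.foldl_cons]
    rw [ih (PySem.Set.add s x), hnil, ih ([x] : PySem.Set String), hadd]
    by_cases hx : s.contains x = true
    · rw [if_pos hx]
      have hxm : x ∈ s := by simpa using hx
      rw [List.filter_append, List.filter_filter]
      have h1 : List.filter (fun y => !(PySem.Set.contains s y)) [x] = [] := by
        simp [PySem.Set.contains, hxm]
      rw [h1, List.nil_append]
      refine congrArg (s ++ ·) (List.filter_congr ?_)
      intro a _
      by_cases ha : a ∈ s
      · simp [PySem.Set.contains, ha]
      · have hax : ¬ (a = x) := fun h => ha (h ▸ hxm)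
        simp [PySem.Set.contains, ha, hax]
    · rw [if_neg hx]
      have hxm : ¬ (x ∈ s) := by simpa using hx
      rw [List.filter_append, List.filter_filter]
      have h1 : List.filter (fun y => !(PySem.Set.contains s y)) [x] = [x] := by
        simp [PySem.Set.contains, hxm]
      rw [h1, List.append_assoc]
      refine congrArg (s ++ ·) (congrArg ([x] ++ ·) (List.filter_congr ?_))
      intro a _
      by_cases hax : a = x
      · simp [PySem.Set.contains, hax]
      · by_cases ha : a ∈ s <;> simp [PySem.Set.contains, ha, hax]

theorem pvDedup_cons (x : String) (xs : List String) :
    PySem.List.dedup (x :: xs)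
      = x :: (PySem.List.dedup xs).filter (fun y => !(y == x)) := by
  have h0 : PySem.List.dedup (x :: xs) = xs.foldl PySem.Set.add [x] := rfl
  have h1 : PySem.List.dedup xs = xs.foldl PySem.Set.add [] := rfl
  rw [h0, h1, pvSetFold xs ([x] : PySem.Set String)]
  refine congrArg (x :: ·) (List.filter_congr ?_)
  intro a _
  simp [PySem.Set.contains, Bool.beq_eq_decide_eq]

def pvCanon (seen : List String) : List String → List String
  | [] => []
  | w :: ws =>
    let wl := PySem.Str.lower w
    if seen.contains wl then pvCanon seen ws else w :: pvCanon (wl :: seen) ws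

theorem pvFirst_cons (w : String) (ws : List String) :
    ((w :: ws).reverse.foldl (fun d v => d.insert (PySem.Str.lower v) v) PySem.Dict.empty)
      = (ws.reverse.foldl (fun d v => d.insert (PySem.Str.lower v) v) PySem.Dict.empty).insert
          (PySem.Str.lower w) w := by
  simp [List.foldl_append]

theorem pvB_loop (add : List String) (seen : List String) :
    ((PySem.List.dedup (add.map PySem.Str.lower)).filter
        (fun k => !(seen.contains k))).map
      (fun k => (add.reverse.foldl (fun d v => d.insert (PySem.Str.lower v) v)
          PySem.Dict.empty).getD k "")
      = pvCanon seen add := by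
  induction add generalizing seen with
  | nil => simp [pvCanon]
  | cons w ws ih =>
    rw [List.map_cons, pvDedup_cons, pvFirst_cons]
    simp only [List.filter_cons, List.filter_filter, pvCanon]
    by_cases hk : (PySem.Str.lower w) ∈ seen
    · have hkc : seen.contains (PySem.Str.lower w) = true := by simpa using hk
      rw [if_neg (by simpa using hk), if_pos hkc, ← ih seen]
      have hmc : ∀ a ∈ List.filter (fun a => !seen.contains a && !(a == PySem.Str.lower w))
            (PySem.List.dedup (ws.map PySem.Str.lower)),
          ((ws.reverse.foldl (fun d v => d.insert (PySem.Str.lower v) v)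
              PySem.Dict.empty).insert (PySem.Str.lower w) w).getD a ""
            = (ws.reverse.foldl (fun d v => d.insert (PySem.Str.lower v) v)
              PySem.Dict.empty).getD a "" := by
        intro a hmem
        have hp := (List.mem_filter.mp hmem).2
        have hane : a ≠ PySem.Str.lower w := by
          intro h; subst h
          simp [hk] at hp
        apply PySem.Dict.getD_insert_of_ne
        exact hane
      rw [List.map_congr_left hmc]
      refine congrArg _ (List.filter_congr ?_)
      intro a _
      by_cases ha : a ∈ seen
      · simp [ha]
      · have : ¬ (a = PySem.Str.lower w) := fun h => ha (h ▸ hk)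
        simp [ha, this]
    · have hkc : seen.contains (PySem.Str.lower w) = false := by simpa using hk
      rw [if_pos (by simpa using hk), if_neg (by simpa using hk), List.map_cons,
        PySem.Dict.getD_insert_self]
      refine congrArg (w :: ·) ?_
      rw [← ih (PySem.Str.lower w :: seen)]
      have hmc : ∀ a ∈ List.filter (fun k => !((PySem.Str.lower w :: seen).contains k))
            (PySem.List.dedup (ws.map PySem.Str.lower)),
          ((ws.reverse.foldl (fun d v => d.insert (PySem.Str.lower v) v)
              PySem.Dict.empty).insert (PySem.Str.lower w) w).getD a ""
            = (ws.reverse.foldl (fun d v => d.insert (PySem.Str.lower v) v)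
              PySem.Dict.empty).getD a "" := by
        intro a hmem
        have hp := (List.mem_filter.mp hmem).2
        have hane : a ≠ PySem.Str.lower w := by
          intro h; subst h; simp at hp
        apply PySem.Dict.getD_insert_of_ne
        exact hane
      rw [← List.map_congr_left hmc]
      refine congrArg _ (List.filter_congr ?_)
      intro a _
      by_cases hax : a = PySem.Str.lower w
      · simp [hax]
      · by_cases ha : a ∈ seen <;> simp [ha, hax]

theorem pvCanon_congr (seen seen' : List String) (add : List String)
    (h : ∀ s, seen.contains s = seen'.contains s) :
    pvCanon seen add = pvCanon seen' add := by
  induction add generalizing seen seen' with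
  | nil => rfl
  | cons w ws ih =>
    simp only [pvCanon, h (PySem.Str.lower w)]
    split
    · exact ih seen seen' h
    · refine congrArg _ (ih _ _ ?_)
      intro s
      have hs := h s; simp at hs; simp [hs]

theorem pvA_contains_seed (l : List String) (d : PySem.Dict String String) (s : String) :
    (l.foldl (fun d x => d.insert (PySem.Str.lower x) x) d).contains s
      = (d.contains s || l.any (fun e => s == PySem.Str.lower e)) := by
  induction l generalizing d with
  | nil => simp
  | cons x xs ih =>
    simp [List.foldl_cons, ih, PySem.Dict.contains_insert, Bool.or_comm, Bool.or_assoc]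

theorem pvA_loop (add : List String) (cur : List String) (d : PySem.Dict String String)
    (seen : List String) (h : ∀ s, d.contains s = seen.contains s) :
    (add.foldl (fun (st : List String × PySem.Dict String String) w =>
        let wl := PySem.Str.lower w
        if st.2.contains wl then st
        else (st.1 ++ [w], st.2.insert wl w)) (cur, d)).1
      = cur ++ pvCanon seen add := by
  induction add generalizing cur d seen with
  | nil => simp [pvCanon]
  | cons w ws ih =>
    simp only [List.foldl_cons, pvCanon, h (PySem.Str.lower w)]
    split
    · exact ih cur d seen h
    · rw [ih (cur ++ [w]) _ (PySem.Str.lower w :: seen) ?_]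
      · simp
      · intro s
        have hs := h s
        simp at hs
        simp [PySem.Dict.contains_insert, hs, Bool.or_comm, Bool.beq_eq_decide_eq]

theorem pv_eq (existing add : List String) :
    uniq_extend existing add = uniq_extend_alt existing add := by
  unfold uniq_extend uniq_extend_alt
  rw [pvA_loop add existing _ (existing.map PySem.Str.lower) ?hinv]
  case hinv =>
    intro s
    rw [pvA_contains_seed]
    simp [Bool.beq_eq_decide_eq, eq_comm, List.any_eq]
  have hB := pvB_loop add (PySem.Set.ofList (existing.map PySem.Str.lower))
  refine congrArg (existing ++ ·) ?_
  exact (pvCanon_congr (existing.map PySem.Str.lower)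
    (PySem.Set.ofList (existing.map PySem.Str.lower)) add
    (fun s => by simp [pysem])).trans hB.symm

-- ===== VERDICT (by name: the statement is the Claim_ definition above) =====
theorem uniq_extend_spec : Claim_equal_uniq_extend := by
  intro existing add _
  unfold Spec_uniq_extend
  exact pv_eq existing add
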